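-- pv_equiv track=rewrite | github.com/himanshugoel2797/HomeResolver2 | system.py | action_is_duplicate
-- ===== SOURCE A (Python) =====
-- def action_is_duplicate(a0, a1):
--     seen = set()
--     new_l = []
--     l = [a0, a1]
--
--     for d in l:
--         t = tuple(d.items())
--         if t not in seen:
--             seen.add(t)
--             new_l.append(d)
--
--     return len(new_l) == 1
-- ===== SOURCE B (Python) =====
-- def action_is_duplicate(a0, a1):
--     return tuple(a0.items()) == tuple(a1.items())
-- ===== Notes on version B (the rewrite author's own statement) =====
-- stated objective: simpler
-- what changed: Replaces the set/accumulator dedup loop over [a0, a1] with a direct order-sensitive comparison of the two dicts' item tuples.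
import Mathlib
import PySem

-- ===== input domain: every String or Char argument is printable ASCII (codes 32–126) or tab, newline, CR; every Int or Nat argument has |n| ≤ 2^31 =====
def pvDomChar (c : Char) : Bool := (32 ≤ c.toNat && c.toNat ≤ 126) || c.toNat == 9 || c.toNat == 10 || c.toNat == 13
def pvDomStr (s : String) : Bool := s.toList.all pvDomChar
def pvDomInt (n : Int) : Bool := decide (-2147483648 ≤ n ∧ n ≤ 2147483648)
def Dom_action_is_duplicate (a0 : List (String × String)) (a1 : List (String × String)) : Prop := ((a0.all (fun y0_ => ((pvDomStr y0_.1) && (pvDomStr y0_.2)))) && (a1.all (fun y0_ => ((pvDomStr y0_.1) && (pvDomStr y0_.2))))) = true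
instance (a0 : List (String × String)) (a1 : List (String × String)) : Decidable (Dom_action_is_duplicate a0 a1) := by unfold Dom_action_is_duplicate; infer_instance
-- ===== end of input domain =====

-- B replaces A's set/accumulator dedup loop over [a0, a1] with a direct order-sensitive
-- comparison of the two item lists (simpler; same cost).


-- ===== PORT A =====
-- Literal port of A: fold over l = [a0, a1], maintaining the set 'seen' of item-tuples
-- and the accumulator 'new_l'; return len(new_l) == 1. tuple(d.items()) is the assoc list itself.
def action_is_duplicate (a0 : List (String × String)) (a1 : List (String × String)) : Bool :=
  let l := [a0, a1]
  let st :=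
    l.foldl
      (fun (st : PySem.Set (List (String × String)) × List (List (String × String))) d =>
        let t := d
        if PySem.Set.contains st.1 t then st
        else (PySem.Set.add st.1 t, st.2 ++ [d]))
      (PySem.Set.empty, [])
  decide (st.2.length = 1)

-- ===== PORT B =====
-- B: direct order-sensitive comparison of the two item lists; no loop, no set, no accumulator.
def action_is_duplicate_alt (a0 : List (String × String)) (a1 : List (String × String)) : Bool :=
  a0 == a1

-- ===== PRECONDITION & SPEC =====
def Spec_action_is_duplicate (a0 : List (String × String)) (a1 : List (String × String)) (out : Bool) : Prop := out = action_is_duplicate_alt a0 a1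
instance (a0 : List (String × String)) (a1 : List (String × String)) (out : Bool) : Decidable (Spec_action_is_duplicate a0 a1 out) := by unfold Spec_action_is_duplicate; infer_instance

-- ===== CLAIM (what is proved, stated in full; the proofs are below) =====
def Claim_equal_action_is_duplicate : Prop := ∀ (a0 : List (String × String)) (a1 : List (String × String)), Dom_action_is_duplicate a0 a1 → Spec_action_is_duplicate a0 a1 (action_is_duplicate a0 a1)

-- ===== LEMMAS AND PROOFS =====

-- ===== VERDICT (by name: the statement is the Claim_ definition above) =====
theorem action_is_duplicate_spec : Claim_equal_action_is_duplicate := by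
  intro a0 a1 _
  unfold Spec_action_is_duplicate action_is_duplicate action_is_duplicate_alt
  simp [PySem.Set.contains, PySem.Set.add, PySem.Set.empty]
  by_cases h : a1 = a0
  · simp [h]
  · simp [h, Ne.symm h]
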